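-- pv_equiv track=rewrite | github.com/AGGM-Software/AetherBasic | AgIntelligence.py | feed_forward_network
-- ===== SOURCE A (Python) =====
-- def feed_forward_network(x):
--     input_dim = len(x[0])
--     hidden_dim = 4
--     output_dim = 2
--     W1 = [[1 if i == j else 0 for j in range(hidden_dim)] for i in range(input_dim)]
--     b1 = [0] * hidden_dim
--     W2 = [[1 for _ in range(output_dim)] for _ in range(hidden_dim)]
--     b2 = [0] * output_dim
--     hidden = [[max(0, sum(x[i][k] * W1[k][j] for k in range(len(W1))) + b1[j])
--                for j in range(hidden_dim)] for i in range(len(x))]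
--     output = [[sum(hidden[i][k] * W2[k][j] for k in range(len(W2))) + b2[j]
--                for j in range(output_dim)] for i in range(len(hidden))]
--     return output
-- ===== SOURCE B (Python) =====
-- def feed_forward_network(x):
--     # identity W1 keeps the first min(input_dim, 4) features (ReLU'd); all-ones W2
--     # makes both outputs the sum of the hidden units.
--     d = min(len(x[0]), 4)
--     out = []
--     for row in x:
--         s = sum(v for v in row[:d] if v > 0)
--         out.append([s, s])
--     return out
-- ===== Notes on version B (the rewrite author's own statement) =====
-- stated objective: faster
-- what changed: Replaces the explicit matrix construction and triple-nested matrix multiplications with a single pass that sums the positive entries of the first min(input_dim,4) columns of each row (the identity W1 + ReLU keeps exactly those, and the all-ones W2 makes both outputs that sum).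
import Mathlib
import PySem

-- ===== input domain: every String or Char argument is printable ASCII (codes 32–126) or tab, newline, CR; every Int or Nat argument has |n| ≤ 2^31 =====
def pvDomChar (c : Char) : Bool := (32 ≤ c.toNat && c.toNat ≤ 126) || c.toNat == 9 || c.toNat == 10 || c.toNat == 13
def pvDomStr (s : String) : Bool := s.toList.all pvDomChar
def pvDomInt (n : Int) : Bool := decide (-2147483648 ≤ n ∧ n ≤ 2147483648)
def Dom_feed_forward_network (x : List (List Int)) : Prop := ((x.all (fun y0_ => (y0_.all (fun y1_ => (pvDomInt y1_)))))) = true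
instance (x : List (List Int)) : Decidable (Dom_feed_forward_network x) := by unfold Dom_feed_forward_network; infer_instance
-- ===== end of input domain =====

-- B replaces the materialised identity/ones weight matrices and nested matrix products
-- with one pass summing the positive entries of the first min(input_dim,4) columns (faster).

-- ===== PORT A =====
def feed_forward_network (x : List (List Int)) : List (List Int) :=
  let input_dim : Int := ((PySem.List.pyGetD x 0 []).length : Int)
  let W1 : List (List Int) := (PySem.List.pyRange 0 input_dim 1).map (fun i =>
    (PySem.List.pyRange 0 4 1).map (fun j => if i = j then (1 : Int) else 0))
  let b1 : List Int := List.replicate 4 0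
  let W2 : List (List Int) := (PySem.List.pyRange 0 4 1).map (fun _ =>
    (PySem.List.pyRange 0 2 1).map (fun _ => (1 : Int)))
  let b2 : List Int := List.replicate 2 0
  let hidden : List (List Int) := (PySem.List.pyRange 0 (x.length : Int) 1).map (fun i =>
    (PySem.List.pyRange 0 4 1).map (fun j =>
      max 0 (((PySem.List.pyRange 0 (W1.length : Int) 1).map (fun k =>
        PySem.List.pyGetD (PySem.List.pyGetD x i []) k 0 *
        PySem.List.pyGetD (PySem.List.pyGetD W1 k []) j 0)).sum
        + PySem.List.pyGetD b1 j 0)))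
  (PySem.List.pyRange 0 (hidden.length : Int) 1).map (fun i =>
    (PySem.List.pyRange 0 2 1).map (fun j =>
      ((PySem.List.pyRange 0 (W2.length : Int) 1).map (fun k =>
        PySem.List.pyGetD (PySem.List.pyGetD hidden i []) k 0 *
        PySem.List.pyGetD (PySem.List.pyGetD W2 k []) j 0)).sum
        + PySem.List.pyGetD b2 j 0))

-- ===== PORT B =====
def feed_forward_network_alt (x : List (List Int)) : List (List Int) :=
  let d : Nat := min (PySem.List.pyGetD x 0 []).length 4
  x.foldl (fun out row =>
    out ++ [[((row.take d).filter (fun v => 0 < v)).sum,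
             ((row.take d).filter (fun v => 0 < v)).sum]]) []

-- ===== PRECONDITION & SPEC =====
-- Pre_ excludes exactly the inputs where A raises IndexError: empty x (x[0]) and
-- rows shorter than the first row (x[i][k] for k < len(x[0])).
def Pre_feed_forward_network (x : List (List Int)) : Prop :=
  x ≠ [] ∧ ∀ r ∈ x, (x.headD []).length ≤ r.length
instance (x : List (List Int)) : Decidable (Pre_feed_forward_network x) := by
  unfold Pre_feed_forward_network; infer_instance

def pvWitness_feed_forward_network : List (List Int) := [[1, -2, 3], [4, 5, -6]]

def Spec_feed_forward_network (x : List (List Int)) (out : List (List Int)) : Prop :=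
  out = feed_forward_network_alt x
instance (x : List (List Int)) (out : List (List Int)) : Decidable (Spec_feed_forward_network x out) := by
  unfold Spec_feed_forward_network; infer_instance

-- ===== CLAIM =====
def Claim_equal_feed_forward_network : Prop :=
  ∀ (x : List (List Int)), Dom_feed_forward_network x → Pre_feed_forward_network x →
    Spec_feed_forward_network x (feed_forward_network x)

-- ===== LEMMAS AND PROOFS =====

-- [j]-th hidden unit of a row r when the input width is n (0 outside the first min(n,4) columns)
def ffnH (n : Nat) (r : List Int) (j : Nat) : Int :=
  max 0 (if (j : Int) < (n : Int) then PySem.List.pyGetD r (j : Int) 0 else 0)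

theorem ffn_e4 : PySem.List.pyRange 0 4 1 = [0, 1, 2, 3] := by decide
theorem ffn_e2 : PySem.List.pyRange 0 2 1 = [0, 1] := by decide

theorem ffn_pick (r : List Int) (m : Nat) (j : Int) (hj : 0 ≤ j) :
    ((List.range m).map (fun k => r.getD k 0 * (if (k : Int) = j then 1 else 0))).sum
      = if j < (m : Int) then PySem.List.pyGetD r j 0 else 0 := by
  induction m with
  | zero =>
    simp only [List.range_zero, List.map_nil, List.sum_nil]
    rw [if_neg (by push_cast; omega)]
  | succ m ih =>
    rw [List.range_succ, List.map_append, List.sum_append, ih]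
    simp only [List.map_cons, List.map_nil, List.sum_cons, List.sum_nil]
    by_cases h1 : (m : Int) = j
    · subst h1
      rw [if_neg (by omega), if_pos (by omega), if_pos (by push_cast; omega)]
      simp [PySem.List.pyGetD_natCast]
    · rw [if_neg h1, mul_zero, add_zero, add_zero]
      by_cases h2 : j < (m : Int)
      · rw [if_pos h2, if_pos (by push_cast; omega)]
      · rw [if_neg h2, if_neg (by push_cast; omega)]

theorem ffn_filter_sum (l : List Int) :
    (l.filter (fun v => 0 < v)).sum = (l.map (fun v => max 0 v)).sum := by
  induction l with
  | nil => rfl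
  | cons h t ih =>
    rw [List.filter_cons, List.map_cons, List.sum_cons, ← ih]
    by_cases hh : 0 < h
    · rw [if_pos (by simpa using hh), List.sum_cons, max_eq_right hh.le]
    · rw [if_neg (by simpa using hh), max_eq_left (by omega), zero_add]

-- inner k-sum of the hidden layer: picking column j through the identity W1
theorem ffn_S_eq (r : List Int) (n : Nat) (j : Int) (hj : 0 ≤ j) (hj4 : j < 4) :
    ((PySem.List.pyRange 0 (n : Int) 1).map (fun k =>
        PySem.List.pyGetD r k 0 *
        PySem.List.pyGetD (PySem.List.pyGetD ((PySem.List.pyRange 0 (n : Int) 1).map (fun i =>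
          [if i = (0 : Int) then (1 : Int) else 0, if i = 1 then 1 else 0,
           if i = 2 then 1 else 0, if i = 3 then 1 else 0])) k []) j 0)).sum
      = if j < (n : Int) then PySem.List.pyGetD r j 0 else 0 := by
  rw [List.map_congr_left
      (g := fun (k : Int) => PySem.List.pyGetD r k 0 * (if k = j then 1 else 0))
      (fun k hk => by
        obtain ⟨hk0, hkn⟩ := PySem.List.mem_pyRange_one.mp hk
        rw [PySem.List.pyGetD_map_pyRange_of_nonneg _ _ _ _ hk0 hkn]
        have h4 : j = 0 ∨ j = 1 ∨ j = 2 ∨ j = 3 := by omega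
        rcases h4 with rfl | rfl | rfl | rfl <;> simp [PySem.List.pyGetD_ofNat'])]
  rw [PySem.List.pyRange_zero_natCast, List.map_map]
  simp only [Function.comp_def, PySem.List.pyGetD_natCast]
  exact ffn_pick r n j hj

-- the hidden row of r is the four ReLU'd picked columns
theorem ffn_hrow_eq (r : List Int) (n : Nat) :
    (PySem.List.pyRange 0 4 1).map (fun j =>
        max 0 (((PySem.List.pyRange 0 (n : Int) 1).map (fun k =>
          PySem.List.pyGetD r k 0 *
          PySem.List.pyGetD (PySem.List.pyGetD ((PySem.List.pyRange 0 (n : Int) 1).map (fun i =>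
            (PySem.List.pyRange 0 4 1).map (fun j' => if i = j' then (1 : Int) else 0))) k []) j 0)).sum
          + PySem.List.pyGetD (List.replicate 4 0) j 0))
      = [ffnH n r 0, ffnH n r 1, ffnH n r 2, ffnH n r 3] := by
  rw [ffn_e4]
  simp only [List.map_cons, List.map_nil]
  rw [ffn_S_eq r n 0 (by omega) (by omega), ffn_S_eq r n 1 (by omega) (by omega),
      ffn_S_eq r n 2 (by omega) (by omega), ffn_S_eq r n 3 (by omega) (by omega)]
  simp [ffnH, PySem.List.pyGetD_ofNat']

-- B's per-row sum equals the sum of the four hidden units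
theorem ffn_rowB_eq (r : List Int) (n : Nat) (h : n ≤ r.length) :
    ((r.take (min n 4)).filter (fun v => 0 < v)).sum
      = ffnH n r 0 + ffnH n r 1 + ffnH n r 2 + ffnH n r 3 := by
  rw [ffn_filter_sum]
  rcases n with _ | _ | _ | _ | m
  · simp [ffnH]
  · obtain ⟨a, t, rfl⟩ : ∃ a t, r = a :: t := by
      match r, h with
      | a :: t, _ => exact ⟨a, t, rfl⟩
    simp [ffnH, PySem.List.pyGetD_ofNat']
  · obtain ⟨a, b, t, rfl⟩ : ∃ a b t, r = a :: b :: t := by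
      match r, h with
      | a :: b :: t, _ => exact ⟨a, b, t, rfl⟩
    simp [ffnH, PySem.List.pyGetD_ofNat']
  · obtain ⟨a, b, c, t, rfl⟩ : ∃ a b c t, r = a :: b :: c :: t := by
      match r, h with
      | a :: b :: c :: t, _ => exact ⟨a, b, c, t, rfl⟩
    simp [ffnH, PySem.List.pyGetD_ofNat']
    omega
  · obtain ⟨a, b, c, d, t, rfl⟩ : ∃ a b c d t, r = a :: b :: c :: d :: t := by
      match r, h with
      | a :: b :: c :: d :: t, _ => exact ⟨a, b, c, d, t, rfl⟩
    have hmin : min (m + 1 + 1 + 1 + 1) 4 = 4 := by omega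
    rw [hmin]
    simp [ffnH, PySem.List.pyGetD_ofNat']
    split_ifs <;> omega

-- ===== VERDICT =====
theorem feed_forward_network_spec : Claim_equal_feed_forward_network := by
  intro x _hdom hpre
  obtain ⟨hne, hall⟩ := hpre
  unfold Spec_feed_forward_network
  simp only [feed_forward_network, feed_forward_network_alt,
    PySem.List.foldl_append_singleton_eq_map, List.nil_append]
  apply List.ext_getElem
  · simp [PySem.List.length_pyRange_one]
  intro i h1 h2
  have hix : i < x.length := by
    simpa [PySem.List.length_pyRange_one] using h2
  simp only [List.getElem_map, PySem.List.getElem_pyRange_one, zero_add]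
  rw [PySem.List.pyGetD_map_pyRange _ _ _ _ (by simpa [PySem.List.length_pyRange_one] using hix)]
  have hxe : PySem.List.pyGetD x (i : Int) [] = x[i] := by
    rw [PySem.List.pyGetD_natCast, List.getD_eq_getElem _ _ hix]
  have hW1len : (List.length ((PySem.List.pyRange 0 ((PySem.List.pyGetD x 0 []).length : Int) 1).map
        (fun i => (PySem.List.pyRange 0 4 1).map (fun j => if i = j then (1 : Int) else 0))) : Int)
      = ((PySem.List.pyGetD x 0 []).length : Int) := by
    simp [PySem.List.length_pyRange_one]
  rw [hxe, hW1len, ffn_hrow_eq]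
  have hW2 : ((PySem.List.pyRange 0 4 1).map (fun _ =>
      (PySem.List.pyRange 0 2 1).map (fun _ => (1 : Int)))) = [[1, 1], [1, 1], [1, 1], [1, 1]] := by
    decide
  rw [hW2]
  have hnle : (PySem.List.pyGetD x 0 []).length ≤ x[i].length := by
    have hh : PySem.List.pyGetD x 0 [] = x.headD [] := by
      cases x with
      | nil => simp at hne
      | cons a t => simp [PySem.List.pyGetD_zero_cons]
    rw [hh]
    exact hall _ (List.getElem_mem hix)
  have h4len : ((([[(1 : Int), 1], [1, 1], [1, 1], [1, 1]] : List (List Int)).length : Nat) : Int) = 4 := by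
    norm_num
  rw [h4len]
  rw [ffn_e2, ffn_e4]
  simp only [List.map_cons, List.map_nil, List.sum_cons, List.sum_nil]
  rw [ffn_rowB_eq x[i] _ hnle]
  simp [PySem.List.pyGetD_ofNat']
  simp [add_assoc]
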